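-- pv_equiv track=rewrite | github.com/YunTianZhou/LeetcodeContest | Weekly Contest/Weekly Contest 476/3747. Count Distinct Integers After Removing Zeros.py | countDistinct
-- ===== SOURCE A (Python) =====
-- def countDistinct(n: int) -> int:
--     ans = base = 1
--     while n:
--         n, x = divmod(n, 10)
--         if x == 0:
--             ans = 0
--         else:
--             ans += (x - 1) * base
--         base *= 9
--
--     ans += (base - 9) // 8
--     return ans
-- ===== SOURCE B (Python) =====
-- def countDistinct(n: int) -> int:
--     # Count zero-free integers in [1, n] (each i maps to its zero-stripped
--     # value, which is zero-free and <= i, and every zero-free m <= n maps to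
--     # itself) by a most-significant-digit scan.
--     if n <= 0:
--         return 0
--     pow10 = 1   # 10^(d-1) where d = number of digits of n
--     pow9 = 1    # 9^(d-1)
--     total = 0   # zero-free numbers with fewer than d digits
--     while pow10 * 10 <= n:
--         pow10 *= 10
--         pow9 *= 9
--         total += pow9
--     rem = n
--     while pow10 > 0:
--         x = rem // pow10
--         if x == 0:
--             return total
--         total += (x - 1) * pow9
--         rem -= x * pow10
--         pow10 //= 10
--         pow9 //= 9
--     return total + 1
-- ===== Notes on version B (the rewrite author's own statement) =====
-- stated objective: alternative
-- what changed: B counts zero-free integers in [1,n] directly: it sums 9^k for all shorter digit lengths, then scans n's digits most-significant-first with an early exit at the first zero digit, instead of A's least-significant-first divmod accumulation with reset-on-zero and the (base-9)//8 closed form.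
-- outside the precondition, e.g. on countDistinct(-1): A does not finish within the time limit, B returns 0
import Mathlib
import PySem

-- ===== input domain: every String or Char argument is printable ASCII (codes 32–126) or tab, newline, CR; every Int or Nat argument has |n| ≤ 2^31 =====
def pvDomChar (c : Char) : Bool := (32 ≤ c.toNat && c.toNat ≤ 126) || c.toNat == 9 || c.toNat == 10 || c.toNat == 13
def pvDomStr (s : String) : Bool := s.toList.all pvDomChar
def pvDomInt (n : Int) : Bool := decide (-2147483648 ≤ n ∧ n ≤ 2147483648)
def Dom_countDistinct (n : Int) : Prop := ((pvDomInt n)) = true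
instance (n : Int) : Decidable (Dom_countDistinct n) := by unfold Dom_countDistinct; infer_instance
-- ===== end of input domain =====

-- B counts zero-free integers in [1,n] by a most-significant-digit-first scan
-- (shorter lengths summed, early exit at the first zero digit) instead of A's
-- least-significant-first divmod accumulation with reset-on-zero (objective: alternative).

-- ===== PORT A =====
-- `while n:` loop of A; the fuel is a totality guard only (on Pre_, n < 10^40,
-- so 40 iterations always suffice; Python A diverges for n < 0, excluded by Pre_).
def aLoop : Nat → Int → Int → Int → Int × Int
  | 0, _, ans, base => (ans, base)
  | fuel+1, n, ans, base =>
    if n = 0 then (ans, base)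
    else
      aLoop fuel (PySem.Int.floordiv n 10)
        (if PySem.Int.mod n 10 = 0 then 0 else ans + (PySem.Int.mod n 10 - 1) * base)
        (base * 9)

def countDistinct (n : Int) : Int :=
  let p := aLoop 40 n 1 1
  p.1 + PySem.Int.floordiv (p.2 - 9) 8

-- ===== PORT B =====
-- first `while pow10 * 10 <= n:` loop; fuel 40 is a totality guard only (pow10 = 10^k
-- exceeds n/10 after at most 40 steps for every n admitted by Dom).
def bGrow : Nat → Int → Int → Int → Int → Int × Int × Int
  | 0, _, p10, p9, t => (p10, p9, t)
  | fuel+1, n, p10, p9, t =>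
    if p10 * 10 ≤ n then bGrow fuel n (p10 * 10) (p9 * 9) (t + p9 * 9)
    else (p10, p9, t)

-- second `while pow10 > 0:` loop (pow10 strictly decreases under //10, so no fuel needed)
def bLoop (rem p10 p9 t : Int) : Int :=
  if h : 0 < p10 then
    let x := PySem.Int.floordiv rem p10
    if x = 0 then t
    else bLoop (rem - x * p10) (PySem.Int.floordiv p10 10) (PySem.Int.floordiv p9 9)
               (t + (x - 1) * p9)
  else t + 1
termination_by p10.toNat
decreasing_by
  rw [PySem.Int.floordiv_eq_ediv_of_pos (by norm_num)]
  omega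

def countDistinct_alt (n : Int) : Int :=
  if n ≤ 0 then 0
  else
    let g := bGrow 40 n 1 1 0
    bLoop n g.1 g.2.1 g.2.2

-- ===== PRECONDITION & SPEC =====
-- Pre_ excludes n < 0, on which Python A's `while n` loop never terminates (no return value).
def Pre_countDistinct (n : Int) : Prop := 0 ≤ n
instance (n : Int) : Decidable (Pre_countDistinct n) := by unfold Pre_countDistinct; infer_instance
def pvWitness_countDistinct : Int := (105)

def Spec_countDistinct (n : Int) (out : Int) : Prop := out = countDistinct_alt n
instance (n : Int) (out : Int) : Decidable (Spec_countDistinct n out) := by unfold Spec_countDistinct; infer_instance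

-- ===== CLAIM (what is proved, stated in full; the proofs are below) =====
def Claim_equal_countDistinct : Prop := ∀ (n : Int), Dom_countDistinct n → Pre_countDistinct n → Spec_countDistinct n (countDistinct n)

-- ===== LEMMAS AND PROOFS =====

-- A's loop as a fold over the LSB-first decimal digit list
def foldA : List Nat → Int → Int → Int × Int
  | [], ans, base => (ans, base)
  | d :: ds, ans, base =>
    foldA ds (if ((d : Int)) = 0 then 0 else ans + ((d : Int) - 1) * base) (base * 9)

-- B's digit scan as a fold over the MSB-first digit list
def foldB : List Nat → Int → Int
  | [], t => t + 1
  | d :: ds, t => if ((d : Int)) = 0 then t else foldB ds (t + ((d : Int) - 1) * 9 ^ ds.length)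

-- S k = 9^1 + … + 9^k
def S : Nat → Int
  | 0 => 0
  | k+1 => S k + 9 ^ (k+1)

theorem aLoop_eq_foldA (fuel : Nat) : ∀ (m : Nat) (ans base : Int),
    (Nat.digits 10 m).length ≤ fuel →
    aLoop fuel (m : Int) ans base = foldA (Nat.digits 10 m) ans base := by
  induction fuel with
  | zero =>
    intro m ans base h
    have hnil : Nat.digits 10 m = [] := List.eq_nil_of_length_eq_zero (by omega)
    have hm : m = 0 := Nat.digits_eq_nil_iff_eq_zero.mp hnil
    subst hm
    simp [aLoop, foldA]
  | succ fuel ih =>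
    intro m ans base h
    by_cases hm : m = 0
    · subst hm; simp [aLoop, foldA]
    · have hd := Nat.digits_def' (b := 10) (by norm_num) (Nat.pos_of_ne_zero hm)
      have hcast : ((m : Int)) ≠ 0 := by exact_mod_cast hm
      have hfd : PySem.Int.floordiv (m : Int) 10 = ((m / 10 : Nat) : Int) := by
        exact_mod_cast PySem.Int.floordiv_natCast m 10
      have hmd : PySem.Int.mod (m : Int) 10 = ((m % 10 : Nat) : Int) := by
        exact_mod_cast PySem.Int.mod_natCast m 10
      have hlen : (Nat.digits 10 (m / 10)).length ≤ fuel := by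
        have := h; rw [hd] at this; simpa using this
      simp only [aLoop, if_neg hcast, hfd, hmd, hd, foldA]
      exact ih (m / 10) _ _ hlen

theorem foldA_snd (ds : List Nat) : ∀ ans base, (foldA ds ans base).2 = base * 9 ^ ds.length := by
  induction ds with
  | nil => intro ans base; simp [foldA]
  | cons d ds ih =>
    intro ans base
    simp only [foldA, ih, List.length_cons, pow_succ]
    ring

theorem foldA_append (ds : List Nat) (d : Nat) : ∀ ans base,
    foldA (ds ++ [d]) ans base =
      ((if ((d : Int)) = 0 then 0 else (foldA ds ans base).1 + ((d : Int) - 1) * (foldA ds ans base).2),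
       (foldA ds ans base).2 * 9) := by
  induction ds with
  | nil => intro ans base; simp [foldA]
  | cons e ds ih =>
    intro ans base
    simp only [List.cons_append, foldA, ih]

-- core identity: the MSB-first scan equals the LSB-first accumulation
theorem foldB_eq_foldA (l : List Nat) : ∀ t, foldB l t = t + (foldA l.reverse 1 1).1 := by
  induction l with
  | nil => intro t; simp [foldB, foldA]
  | cons d l ih =>
    intro t
    simp only [foldB, List.reverse_cons, foldA_append]
    by_cases hd : ((d : Int)) = 0
    · simp [hd]
    · simp only [hd, if_false, ih, foldA_snd, List.length_reverse, one_mul]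
      ring

theorem bGrow_eq (m : Nat) (hm : 0 < m) (fuel k : Nat)
    (hk : k ≤ (Nat.digits 10 m).length - 1)
    (hf : (Nat.digits 10 m).length - 1 ≤ k + fuel) :
    bGrow fuel (m : Int) (10 ^ k) (9 ^ k) (S k) =
      (10 ^ ((Nat.digits 10 m).length - 1), 9 ^ ((Nat.digits 10 m).length - 1),
       S ((Nat.digits 10 m).length - 1)) := by
  induction fuel generalizing k with
  | zero =>
    have hkL : k = (Nat.digits 10 m).length - 1 := by omega
    subst hkL
    simp [bGrow]
  | succ fuel ih =>
    have hD : 1 ≤ (Nat.digits 10 m).length := by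
      have : Nat.digits 10 m ≠ [] := Nat.digits_ne_nil_iff_ne_zero.mpr (by omega)
      cases h : Nat.digits 10 m with
      | nil => exact absurd h this
      | cons a l => simp
    by_cases hkL : k = (Nat.digits 10 m).length - 1
    · subst hkL
      have hub : m < 10 ^ (Nat.digits 10 m).length := Nat.lt_base_pow_length_digits (by norm_num)
      have hcond : ¬ ((10:Int) ^ ((Nat.digits 10 m).length - 1) * 10 ≤ (m : Int)) := by
        have h1 : (10:Int) ^ ((Nat.digits 10 m).length - 1) * 10
            = ((10 ^ (Nat.digits 10 m).length : Nat) : Int) := by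
          push_cast
          rw [← pow_succ]
          congr 1
          omega
        rw [h1]
        intro hle
        have : (10 ^ (Nat.digits 10 m).length : Nat) ≤ m := by exact_mod_cast hle
        omega
      simp [bGrow, hcond]
    · have hk' : k < (Nat.digits 10 m).length - 1 := by omega
      have hcond : (10:Int) ^ k * 10 ≤ (m : Int) := by
        have hge : (10 ^ (k+1) : Nat) ≤ m := by
          by_contra hlt
          have : (Nat.digits 10 m).length ≤ k + 1 :=
            (Nat.digits_length_le_iff (by norm_num) m).mpr (by omega)
          omega
        have h1 : (10:Int) ^ k * 10 = ((10 ^ (k+1) : Nat) : Int) := by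
          push_cast; ring
        rw [h1]
        exact_mod_cast hge
      have hstep : bGrow (fuel+1) (m : Int) (10 ^ k) (9 ^ k) (S k)
          = bGrow fuel (m : Int) (10 ^ k * 10) (9 ^ k * 9) (S k + 9 ^ k * 9) := by
        simp [bGrow, hcond]
      rw [hstep]
      have h10 : (10:Int) ^ k * 10 = 10 ^ (k+1) := by ring
      have h9 : (9:Int) ^ k * 9 = 9 ^ (k+1) := by ring
      have hS : S k + (9:Int) ^ (k+1) = S (k+1) := by
        simp only [S]
      rw [h10, h9, hS]
      exact ih (k+1) (by omega) (by omega)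

theorem bLoop_eq (l : List Nat) : ∀ (d : Nat) (t : Int),
    (∀ x ∈ d :: l, x < 10) →
    bLoop ((Nat.ofDigits 10 (d :: l).reverse : Nat) : Int) (10 ^ l.length) (9 ^ l.length) t =
      foldB (d :: l) t := by
  induction l with
  | nil =>
    intro d t hlt
    have hv : (Nat.ofDigits 10 ([d] : List Nat).reverse : Nat) = d := by
      simp
    rw [bLoop]
    have hx : PySem.Int.floordiv ((Nat.ofDigits 10 ([d] : List Nat).reverse : Nat) : Int)
        ((10:Int) ^ ([] : List Nat).length) = (d : Int) := by
      rw [hv]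
      simp only [List.length_nil, pow_zero]
      rw [PySem.Int.floordiv_eq_ediv_of_pos (by norm_num)]
      simp
    rw [dif_pos (by norm_num)]
    simp only [hx]
    by_cases hd : ((d : Int)) = 0
    · rw [if_pos hd]
      simp [foldB, hd]
    · rw [if_neg hd, bLoop]
      rw [dif_neg (by
        rw [PySem.Int.floordiv_eq_ediv_of_pos (by norm_num)]
        norm_num)]
      have hd' : d ≠ 0 := by exact_mod_cast hd
      simp [foldB, hd']
      try ring
  | cons e l ih =>
    intro d t hlt
    have hL : ((e :: l) : List Nat).length = l.length + 1 := by simp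
    have hwlt : (Nat.ofDigits 10 ((e :: l) : List Nat).reverse : Nat) < 10 ^ (l.length + 1) := by
      have := Nat.ofDigits_lt_base_pow_length (b := 10) (l := ((e :: l) : List Nat).reverse)
        (by norm_num) (by
          intro x hx
          exact hlt x (by simp at hx ⊢; tauto))
      simpa using this
    have hv : (Nat.ofDigits 10 ((d :: e :: l) : List Nat).reverse : Nat)
        = Nat.ofDigits 10 ((e :: l) : List Nat).reverse + 10 ^ (l.length + 1) * d := by
      have : ((d :: e :: l) : List Nat).reverse = ((e :: l) : List Nat).reverse ++ [d] := by
        simp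
      rw [this, Nat.ofDigits_append]
      simp [Nat.ofDigits]
    have hx : PySem.Int.floordiv ((Nat.ofDigits 10 ((d :: e :: l) : List Nat).reverse : Nat) : Int)
        ((10:Int) ^ ((e :: l) : List Nat).length) = (d : Int) := by
      have h1 : ((10:Int) ^ ((e :: l) : List Nat).length) = ((10 ^ (l.length + 1) : Nat) : Int) := by
        push_cast; simp
      rw [h1]
      have h2 : PySem.Int.floordiv ((Nat.ofDigits 10 ((d :: e :: l) : List Nat).reverse : Nat) : Int)
          ((10 ^ (l.length + 1) : Nat) : Int)
          = (((Nat.ofDigits 10 ((d :: e :: l) : List Nat).reverse : Nat) / 10 ^ (l.length + 1) : Nat) : Int) := by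
        exact_mod_cast PySem.Int.floordiv_natCast _ _
      rw [h2]
      congr 1
      rw [hv, Nat.add_mul_div_left _ _ (by positivity), Nat.div_eq_of_lt hwlt]
      simp
    rw [bLoop, dif_pos (by positivity)]
    simp only [hx]
    by_cases hd : ((d : Int)) = 0
    · rw [if_pos hd]
      simp [foldB, hd]
    · rw [if_neg hd]
      have hrem : ((Nat.ofDigits 10 ((d :: e :: l) : List Nat).reverse : Nat) : Int)
          - (d : Int) * (10:Int) ^ ((e :: l) : List Nat).length
          = ((Nat.ofDigits 10 ((e :: l) : List Nat).reverse : Nat) : Int) := by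
        rw [hv]; push_cast; simp; ring
      have hp10 : PySem.Int.floordiv ((10:Int) ^ ((e :: l) : List Nat).length) 10
          = (10:Int) ^ l.length := by
        rw [PySem.Int.floordiv_eq_ediv_of_pos (by norm_num), hL, pow_succ,
          Int.mul_ediv_cancel _ (by norm_num)]
      have hp9 : PySem.Int.floordiv ((9:Int) ^ ((e :: l) : List Nat).length) 9
          = (9:Int) ^ l.length := by
        rw [PySem.Int.floordiv_eq_ediv_of_pos (by norm_num), hL, pow_succ,
          Int.mul_ediv_cancel _ (by norm_num)]
      rw [hrem, hp10, hp9]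
      have := ih e (t + ((d : Int) - 1) * 9 ^ ((e :: l) : List Nat).length)
        (by intro x hx; exact hlt x (by simp at hx ⊢; tauto))
      rw [this]
      have hd' : d ≠ 0 := by exact_mod_cast hd
      simp [foldB, hd']

theorem eight_mul_S (k : Nat) : 8 * S k = 9 ^ (k+1) - 9 := by
  induction k with
  | zero => simp [S]
  | succ k ih =>
    simp only [S, mul_add, ih, pow_succ]
    ring

theorem S_eq_floordiv (k : Nat) : PySem.Int.floordiv ((9:Int) ^ (k+1) - 9) 8 = S k := by
  rw [PySem.Int.floordiv_eq_ediv_of_pos (by norm_num), ← eight_mul_S k,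
      Int.mul_ediv_cancel_left _ (by norm_num)]

-- ===== VERDICT (by name: the statement is the Claim_ definition above) =====
theorem countDistinct_spec : Claim_equal_countDistinct := by
  intro n hdom hpre
  unfold Spec_countDistinct
  have hn : ((n.toNat : Nat) : Int) = n := Int.toNat_of_nonneg hpre
  obtain ⟨m, rfl⟩ : ∃ m : Nat, ((m : Nat) : Int) = n := ⟨n.toNat, hn⟩
  by_cases h0 : m = 0
  · subst h0; decide
  · have hmpos : 0 < m := Nat.pos_of_ne_zero h0
    have hbound : m ≤ 2147483648 := by
      have := hdom
      unfold Dom_countDistinct pvDomInt at this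
      simp only [decide_eq_true_eq] at this
      omega
    have hub : m < 10 ^ 40 := lt_of_le_of_lt hbound (by norm_num)
    have hlen : (Nat.digits 10 m).length ≤ 40 :=
      (Nat.digits_length_le_iff (by norm_num) m).mpr hub
    have hne : Nat.digits 10 m ≠ [] := Nat.digits_ne_nil_iff_ne_zero.mpr h0
    have hD : 1 ≤ (Nat.digits 10 m).length := by
      cases h : Nat.digits 10 m with
      | nil => exact absurd h hne
      | cons a l => simp
    -- A side
    have hA : countDistinct (m : Int)
        = (foldA (Nat.digits 10 m) 1 1).1
          + PySem.Int.floordiv ((9:Int) ^ (Nat.digits 10 m).length - 9) 8 := by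
      show (aLoop 40 (m : Int) 1 1).1 + PySem.Int.floordiv ((aLoop 40 (m : Int) 1 1).2 - 9) 8 = _
      rw [aLoop_eq_foldA 40 m 1 1 hlen, foldA_snd, one_mul]
    -- B side
    have hneg : ¬ ((m : Int) ≤ 0) := by
      intro h; have : m = 0 := by exact_mod_cast le_antisymm (by exact_mod_cast h) (Nat.zero_le m)
      exact h0 this
    have hB : countDistinct_alt (m : Int)
        = bLoop (m : Int) ((10:Int) ^ ((Nat.digits 10 m).length - 1))
            ((9:Int) ^ ((Nat.digits 10 m).length - 1)) (S ((Nat.digits 10 m).length - 1)) := by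
      show (if (m : Int) ≤ 0 then 0 else _) = _
      rw [if_neg hneg]
      have hg := bGrow_eq m hmpos 40 0 (by omega) (by omega)
      simp only [pow_zero] at hg
      have hS0 : S 0 = 0 := rfl
      rw [← hS0, hg]
    obtain ⟨d, l, hdl⟩ : ∃ d ds, (Nat.digits 10 m).reverse = d :: ds := by
      cases h : (Nat.digits 10 m).reverse with
      | nil => exact absurd (by simpa using h) hne
      | cons a l => exact ⟨a, l, rfl⟩
    have hlenl : l.length = (Nat.digits 10 m).length - 1 := by
      have : (Nat.digits 10 m).reverse.length = (Nat.digits 10 m).length := by simp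
      rw [hdl] at this; simp at this; omega
    have hmval : ((m : Nat) : Int) = ((Nat.ofDigits 10 ((d :: l) : List Nat).reverse : Nat) : Int) := by
      rw [← hdl, List.reverse_reverse, Nat.ofDigits_digits]
    have hlt : ∀ x ∈ (d :: l : List Nat), x < 10 := by
      intro x hx
      have : x ∈ (Nat.digits 10 m).reverse := by rw [hdl]; exact hx
      exact Nat.digits_lt_base (by norm_num) (by simpa using this)
    rw [hA, hB, hmval, ← hlenl, bLoop_eq l d _ hlt]
    have hfoldB : foldB (d :: l) (S l.length)
        = S l.length + (foldA (Nat.digits 10 m) 1 1).1 := by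
      rw [← hdl, foldB_eq_foldA, List.reverse_reverse]
    rw [hfoldB]
    have h9 : (9:Int) ^ (Nat.digits 10 m).length = (9:Int) ^ (l.length + 1) := by
      congr 1; omega
    rw [h9, S_eq_floordiv]
    ring
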